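-- pv_equiv track=rewrite | github.com/lotsofliquidity/l33tc0d3 | arrays-and-strings/sliding-window/examples/find-max-length-bit-flip.py | find__max_length_bit_flip_v2
-- ===== SOURCE A (Python) =====
-- def find__max_length_bit_flip_v2(s):
--     left = curr = ans = 0
--
--     for right in range(len(s)):
--         # 110
--         # 1100
--         if s[right] == '0':
--             curr += 1
--             # Good! 1 bit if flipped.
--             # Uh oh, 2 bits are now flipped! - proceed to next condition
--
--         while curr > 1:
--             # Left most bit if not a 0
--             # 2nd element from left is not a 0
--             if s[left] == '0':
--                 curr -= 1
--
--             # if it's a 1 or 0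
--             left += 1
--
--         ans = max(ans, right - left + 1)
--
--     return ans
-- ===== SOURCE B (Python) =====
-- def find__max_length_bit_flip_v2(s):
--     start = 0       # current window start
--     prev = -1       # index of the last '0' seen (-1 if none)
--     ans = 0
--     for right, ch in enumerate(s):
--         if ch == '0':
--             start = prev + 1
--             prev = right
--         if right - start + 1 > ans:
--             ans = right - start + 1
--     return ans
-- ===== Notes on version B (the rewrite author's own statement) =====
-- stated objective: alternative
-- what changed: Replaces the zero-counter plus inner shrink while-loop with a single pass that remembers only the index of the last zero seen and jumps the window start directly to last_zero+1 when a new zero arrives.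
import Mathlib
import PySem

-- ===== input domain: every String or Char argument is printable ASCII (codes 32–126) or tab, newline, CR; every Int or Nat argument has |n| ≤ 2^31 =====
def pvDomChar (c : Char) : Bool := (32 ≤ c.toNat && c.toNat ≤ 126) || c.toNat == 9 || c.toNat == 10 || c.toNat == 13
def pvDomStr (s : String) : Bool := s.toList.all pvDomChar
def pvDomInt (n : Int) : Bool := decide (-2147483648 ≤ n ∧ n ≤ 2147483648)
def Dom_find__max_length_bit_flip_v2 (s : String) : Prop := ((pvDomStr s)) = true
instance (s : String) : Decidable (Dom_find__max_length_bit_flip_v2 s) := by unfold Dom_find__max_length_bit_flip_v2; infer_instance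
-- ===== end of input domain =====

-- B replaces A's zero-counter and inner shrink while-loop by a single pass that
-- remembers the index of the last zero and jumps the window start directly (alternative decomposition, same cost).

-- ===== PORT A =====
-- A's inner `while curr > 1` loop.  The `left < cs.length` check exists only to make the
-- recursion total: in Python `s[left]` is always in range when this loop runs.
def fmlShrink (cs : List Char) (left curr : Nat) : Nat × Nat :=
  if curr > 1 then
    if h : left < cs.length then
      fmlShrink cs (left + 1) (if cs[left] = '0' then curr - 1 else curr)
    else (left, curr)
  else (left, curr)
termination_by cs.length - left

-- `for right in range(len(s))` reading s[right]: walk the characters keeping the index.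
def fmlLoopA (cs rest : List Char) (right left curr : Nat) (ans : Int) : Int :=
  match rest with
  | [] => ans
  | c :: rest' =>
    let curr1 := if c = '0' then curr + 1 else curr
    let lc := fmlShrink cs left curr1
    fmlLoopA cs rest' (right + 1) lc.1 lc.2 (max ans ((right : Int) - (lc.1 : Int) + 1))

def find__max_length_bit_flip_v2 (s : String) : Int :=
  fmlLoopA s.toList s.toList 0 0 0 0

-- ===== PORT B =====
-- `for right, ch in enumerate(s)` with state (start, prev, ans).
def fmlLoopB (rest : List Char) (right start prev ans : Int) : Int :=
  match rest with
  | [] => ans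
  | c :: rest' =>
    let sp : Int × Int := if c = '0' then (prev + 1, right) else (start, prev)
    fmlLoopB rest' (right + 1) sp.1 sp.2
      (if right - sp.1 + 1 > ans then right - sp.1 + 1 else ans)

def find__max_length_bit_flip_v2_alt (s : String) : Int :=
  fmlLoopB s.toList 0 0 (-1) 0

-- ===== PRECONDITION & SPEC =====
def Spec_find__max_length_bit_flip_v2 (s : String) (out : Int) : Prop := out = find__max_length_bit_flip_v2_alt s
instance (s : String) (out : Int) : Decidable (Spec_find__max_length_bit_flip_v2 s out) := by unfold Spec_find__max_length_bit_flip_v2; infer_instance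

-- ===== CLAIM (what is proved, stated in full; the proofs are below) =====
def Claim_equal_find__max_length_bit_flip_v2 : Prop := ∀ (s : String), Dom_find__max_length_bit_flip_v2 s → Spec_find__max_length_bit_flip_v2 s (find__max_length_bit_flip_v2 s)

-- ===== LEMMAS AND PROOFS =====

lemma fmlShrink_le_one (cs : List Char) (left curr : Nat) (h : curr ≤ 1) :
    fmlShrink cs left curr = (left, curr) := by
  unfold fmlShrink
  simp [Nat.not_lt.mpr h]

lemma fmlShrink_finds (cs : List Char) (p : Nat) (hp : p < cs.length)
    (hz : cs.getD p ' ' = '0') :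
    ∀ left, left ≤ p → (∀ i, left ≤ i → i < p → cs.getD i ' ' ≠ '0') →
      fmlShrink cs left 2 = (p + 1, 1) := by
  intro left hle hno
  induction hd : p - left generalizing left with
  | zero =>
    have hlp : left = p := by omega
    subst hlp
    have hcz : cs[left] = '0' := by
      rw [← List.getD_eq_getElem cs ' ' hp]; exact hz
    unfold fmlShrink
    rw [if_pos (by omega : 2 > 1), dif_pos hp, hcz, if_pos rfl]
    simpa using fmlShrink_le_one cs (left + 1) (2 - 1) (by omega)
  | succ n ih =>
    have hlt : left < p := by omega
    have h1 : left < cs.length := by omega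
    have hcz : cs[left] ≠ '0' := by
      rw [← List.getD_eq_getElem cs ' ' h1]
      exact hno left le_rfl hlt
    unfold fmlShrink
    rw [if_pos (by omega : 2 > 1), dif_pos h1, if_neg hcz]
    exact ih (left + 1) (by omega) (fun i h1 h2 => hno i (by omega) h2) (by omega)

lemma int_max_if (a b : Int) : (if b > a then b else a) = max a b := by
  rcases max_cases a b with ⟨h1, h2⟩ | ⟨h1, h2⟩ <;> split_ifs <;> omega

lemma fmlLoop_eq (rest : List Char) :
    ∀ (cs : List Char) (right left curr : Nat) (prev ans : Int),
      cs.drop right = rest →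
      left ≤ right →
      ((prev = -1 ∧ left = 0 ∧ curr = 0 ∧ ∀ i : Nat, i < right → cs.getD i ' ' ≠ '0')
       ∨ (0 ≤ prev ∧ prev < (right : Int) ∧ (left : Int) ≤ prev ∧ curr = 1 ∧
          cs.getD prev.toNat ' ' = '0' ∧
          ∀ i : Nat, left ≤ i → i < right → (i : Int) ≠ prev → cs.getD i ' ' ≠ '0')) →
      fmlLoopA cs rest right left curr ans = fmlLoopB rest (right : Int) (left : Int) prev ans := by
  induction rest with
  | nil => intro cs right left curr prev ans _ _ _; rfl
  | cons c rest' ih =>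
    intro cs right left curr prev ans hdrop hlr hinv
    have hlen := congrArg List.length hdrop
    simp only [List.length_drop, List.length_cons] at hlen
    have hrlen : right < cs.length := by omega
    have hkey := (List.drop_eq_getElem_cons hrlen).symm.trans hdrop
    injection hkey with h1 h2
    have hcr : cs.getD right ' ' = c := by
      rw [List.getD_eq_getElem cs ' ' hrlen]; exact h1
    have hdrop' : cs.drop (right + 1) = rest' := h2
    have e2 : ((right : Int) + 1) = (((right + 1 : Nat)) : Int) := by push_cast; ring
    by_cases hc : c = '0'
    · subst hc
      rcases hinv with ⟨hp, hl0, hc0, hno⟩ | ⟨hp0, hpr, hlp, hc1, hpz, hno⟩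
      · -- first zero ever: A does not shrink, B jumps start to -1+1 = 0 = left
        subst hp hl0 hc0
        have hshr : fmlShrink cs 0 (0 + 1) = (0, 0 + 1) :=
          fmlShrink_le_one cs 0 (0 + 1) (by omega)
        simp only [fmlLoopA, fmlLoopB, reduceIte, hshr]
        have e1 : (-1 + 1 : Int) = ((0 : Nat) : Int) := by norm_num
        rw [int_max_if, e1, e2]
        exact ih cs (right + 1) 0 (0 + 1) ((right : Nat) : Int) _ hdrop' (by omega)
          (Or.inr ⟨by omega, by omega, by omega, by omega, by simpa using hcr,
            by
              intro i hi1 hi2 hi3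
              have hir : i ≠ right := by exact_mod_cast hi3
              exact hno i (by omega)⟩)
      · -- a second zero: A shrinks past the zero at prev, B jumps start to prev+1
        subst hc1
        have hshr : fmlShrink cs left (1 + 1) = (prev.toNat + 1, 1) := by
          have : (1 + 1 : Nat) = 2 := rfl
          rw [this]
          apply fmlShrink_finds cs prev.toNat (by omega) hpz left (by omega)
          intro i hi1 hi2
          exact hno i hi1 (by omega) (by omega)
        simp only [fmlLoopA, fmlLoopB, reduceIte, hshr]
        have e1 : (prev + 1 : Int) = (((prev.toNat + 1 : Nat)) : Int) := by omega
        rw [int_max_if, e1, e2]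
        exact ih cs (right + 1) (prev.toNat + 1) 1 ((right : Nat) : Int) _ hdrop' (by omega)
          (Or.inr ⟨by omega, by omega, by omega, by omega, by simpa using hcr,
            by
              intro i hi1 hi2 hi3
              have hir : i ≠ right := by exact_mod_cast hi3
              have hgt : (i : Int) ≠ prev := by omega
              exact hno i (by omega) (by omega) hgt⟩)
    · -- not a zero: neither window start moves
      have hcurr : curr ≤ 1 := by
        rcases hinv with ⟨_, _, h, _⟩ | ⟨_, _, _, h, _⟩ <;> omega
      have hshr : fmlShrink cs left curr = (left, curr) := fmlShrink_le_one cs left curr hcurr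
      simp only [fmlLoopA, fmlLoopB, if_neg hc, hshr]
      rw [int_max_if, e2]
      refine ih cs (right + 1) left curr prev _ hdrop' (by omega) ?_
      rcases hinv with ⟨hp, hl0, hc0, hno⟩ | ⟨hp0, hpr, hlp, hc1, hpz, hno⟩
      · refine Or.inl ⟨hp, hl0, hc0, ?_⟩
        intro i hi
        by_cases h : i = right
        · subst h; rw [hcr]; exact hc
        · exact hno i (by omega)
      · refine Or.inr ⟨hp0, by omega, hlp, hc1, hpz, ?_⟩
        intro i hi1 hi2 hi3
        by_cases h : i = right
        · subst h; rw [hcr]; exact hc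
        · exact hno i hi1 (by omega) hi3

-- ===== VERDICT (by name: the statement is the Claim_ definition above) =====
theorem find__max_length_bit_flip_v2_spec : Claim_equal_find__max_length_bit_flip_v2 := by
  intro s _
  unfold Spec_find__max_length_bit_flip_v2 find__max_length_bit_flip_v2 find__max_length_bit_flip_v2_alt
  exact fmlLoop_eq s.toList s.toList 0 0 0 (-1) 0 rfl (le_refl 0)
    (Or.inl ⟨rfl, rfl, rfl, fun i hi => absurd hi (Nat.not_lt_zero i)⟩)
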